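-- pv_equiv track=rewrite | github.com/Murali-group/PathLinker | parse.py | get_ranked_nodes
-- ===== SOURCE A (Python) =====
-- def get_ranked_nodes(ranked_edges):
--     """
--     Given: a list of sets of edges, where all nodes in the set have
--     the same rank
--
--     Outputs: A list of sets of nodes, where all nodes in the set have
--     the same rank
--     """
--     ranked_nodes = []
--     overall_set = set()
--     current_set = set()
--
--     for edge_set in ranked_edges:
--         for edge in edge_set:
--             for node in edge:
--                 if node not in overall_set:
--                     overall_set.add(node)
--                     current_set.add(node)
--
--         ranked_nodes.append(current_set)
--         current_set = set()
--
--     return ranked_nodes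
-- ===== SOURCE B (Python) =====
-- def get_ranked_nodes(ranked_edges):
--     """
--     Given: a list of sets of edges, where all nodes in the set have
--     the same rank
--
--     Outputs: A list of sets of nodes, where all nodes in the set have
--     the same rank
--     """
--     # Stage 1: one dict mapping each node to the rank of its first appearance.
--     first = {}
--     for i, edge_set in enumerate(ranked_edges):
--         for u, v in edge_set:
--             first.setdefault(u, i)
--             first.setdefault(v, i)
--     # Stage 2: group the nodes by that rank.
--     ranked_nodes = [set() for _ in ranked_edges]
--     for node, i in first.items():
--         ranked_nodes[i].add(node)
--     return ranked_nodes
-- ===== Notes on version B (the rewrite author's own statement) =====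
-- stated objective: alternative
-- what changed: Replaces A's single streaming pass with a per-node 'not seen yet' branch by two staged passes: first build a dict mapping each node to the rank index of its first appearance (setdefault), then distribute the dict's items into per-rank buckets.
import Mathlib
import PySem

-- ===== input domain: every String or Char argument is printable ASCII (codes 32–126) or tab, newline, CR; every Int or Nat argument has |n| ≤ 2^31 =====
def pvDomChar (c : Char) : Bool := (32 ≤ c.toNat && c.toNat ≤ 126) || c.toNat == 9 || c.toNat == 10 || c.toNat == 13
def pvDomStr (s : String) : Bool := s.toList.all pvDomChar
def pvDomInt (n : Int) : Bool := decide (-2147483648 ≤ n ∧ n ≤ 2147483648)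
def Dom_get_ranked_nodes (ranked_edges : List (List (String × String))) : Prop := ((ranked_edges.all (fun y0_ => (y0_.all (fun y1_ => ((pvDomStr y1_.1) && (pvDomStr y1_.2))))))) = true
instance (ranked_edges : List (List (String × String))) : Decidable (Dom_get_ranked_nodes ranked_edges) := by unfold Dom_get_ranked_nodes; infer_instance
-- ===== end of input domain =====

-- B replaces A's single streaming pass (per-node 'not seen yet' branch) by two staged
-- passes: a dict node -> rank of first appearance, then grouping the dict's items by rank.


-- ===== PORT A =====
-- 'if node not in overall_set: overall_set.add(node); current_set.add(node)'
def pvStepA (st : PySem.Set String × PySem.Set String) (node : String) :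
    PySem.Set String × PySem.Set String :=
  if st.1.contains node then st else (st.1.add node, st.2.add node)

-- body of 'for edge_set in ranked_edges:' — state (ranked_nodes, overall_set)
def pvOuterA (st : List (List String) × PySem.Set String)
    (edge_set : List (String × String)) : List (List String) × PySem.Set String :=
  -- 'for edge in edge_set: for node in edge: …'  (state (overall_set, current_set))
  let inner := edge_set.foldl
    (fun st2 edge => [edge.1, edge.2].foldl pvStepA st2) (st.2, PySem.Set.empty)
  (st.1 ++ [inner.2], inner.1)

def get_ranked_nodes (ranked_edges : List (List (String × String))) : List (List String) :=
  (ranked_edges.foldl pvOuterA ([], PySem.Set.empty)).1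

-- ===== PORT B =====
-- 'first.setdefault(u, i); first.setdefault(v, i)'
def pvSetdefault2 (i : Int) (d : PySem.Dict String Int) (e : String × String) :
    PySem.Dict String Int :=
  (d.setdefault e.1 i).setdefault e.2 i

-- stage 1: 'for i, edge_set in enumerate(ranked_edges): for u, v in edge_set: …'
def pvFirstDict (ranked_edges : List (List (String × String))) : PySem.Dict String Int :=
  (PySem.List.enumerate ranked_edges).foldl
    (fun d p => p.2.foldl (pvSetdefault2 p.1) d) PySem.Dict.empty

-- stage 2 body: 'ranked_nodes[i].add(node)'
def pvDistStep (acc : List (List String)) (p : String × Int) : List (List String) :=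
  PySem.List.pySetD acc p.2 (PySem.Set.add (PySem.List.pyGetD acc p.2 []) p.1)

def get_ranked_nodes_alt (ranked_edges : List (List (String × String))) : List (List String) :=
  let first := pvFirstDict ranked_edges
  -- 'ranked_nodes = [set() for _ in ranked_edges]'
  let init := ranked_edges.map (fun _ => (PySem.Set.empty : PySem.Set String))
  -- 'for node, i in first.items(): ranked_nodes[i].add(node)'
  first.items.foldl pvDistStep init

-- ===== PRECONDITION & SPEC =====
def Spec_get_ranked_nodes (ranked_edges : List (List (String × String))) (out : List (List String)) : Prop := out = get_ranked_nodes_alt ranked_edges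
instance (ranked_edges : List (List (String × String))) (out : List (List String)) : Decidable (Spec_get_ranked_nodes ranked_edges out) := by unfold Spec_get_ranked_nodes; infer_instance

-- ===== CLAIM (what is proved, stated in full; the proofs are below) =====
def Claim_equal_get_ranked_nodes : Prop := ∀ (ranked_edges : List (List (String × String))), Dom_get_ranked_nodes ranked_edges → Spec_get_ranked_nodes ranked_edges (get_ranked_nodes ranked_edges)

-- ===== LEMMAS AND PROOFS =====

-- the node stream of one rank, in visit order (shared by both characterisations)
def pvStream (es : List (String × String)) : List String :=
  es.flatMap (fun e => [e.1, e.2])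

-- the new nodes of one rank, given the nodes already seen
def pvNew (seen : List String) : List String → List String
  | [] => []
  | n :: t => if seen.contains n then pvNew seen t else n :: pvNew (seen ++ [n]) t

-- the per-rank groups of new nodes (the common value of both programs)
def pvGroups (ov : List String) : List (List (String × String)) → List (List String)
  | [] => []
  | r :: rs => pvNew ov (pvStream r) :: pvGroups (ov ++ pvNew ov (pvStream r)) rs

-- the items of B's dict: each group tagged with its rank index
def pvTag (k : Int) : List (List String) → List (String × Int)
  | [] => []
  | g :: gs => g.map (fun n => (n, k)) ++ pvTag (k + 1) gs

theorem pvNew_not_mem_seen (l : List String) (seen : List String) :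
    ∀ x ∈ pvNew seen l, x ∉ seen := by
  induction l generalizing seen with
  | nil => simp [pvNew]
  | cons n t ih =>
    intro x hx
    by_cases hn : n ∈ seen
    · rw [pvNew, if_pos (by simpa using hn)] at hx
      exact ih seen x hx
    · rw [pvNew, if_neg (by simpa using hn)] at hx
      rcases List.mem_cons.mp hx with hx | hx
      · subst hx; exact hn
      · have := ih (seen ++ [n]) x hx
        intro hxs
        exact this (by simp [hxs])

theorem pvNew_nodup (l : List String) (seen : List String) : (pvNew seen l).Nodup := by
  induction l generalizing seen with
  | nil => simp [pvNew]
  | cons n t ih =>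
    by_cases hn : n ∈ seen
    · rw [pvNew, if_pos (by simpa using hn)]
      exact ih seen
    · rw [pvNew, if_neg (by simpa using hn)]
      simp only [List.nodup_cons]
      refine ⟨fun hmem => ?_, ih (seen ++ [n])⟩
      exact pvNew_not_mem_seen t (seen ++ [n]) n hmem (by simp)

theorem pvGroups_length (rs : List (List (String × String))) (ov : List String) :
    (pvGroups ov rs).length = rs.length := by
  induction rs generalizing ov with
  | nil => rfl
  | cons r t ih => simp [pvGroups, ih]

theorem pvGroups_flatten_nodup (rs : List (List (String × String))) (ov : List String) :
    (pvGroups ov rs).flatten.Nodup ∧ ∀ x ∈ (pvGroups ov rs).flatten, x ∉ ov := by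
  induction rs generalizing ov with
  | nil => simp [pvGroups]
  | cons r t ih =>
    obtain ⟨ihn, ihm⟩ := ih (ov ++ pvNew ov (pvStream r))
    simp only [pvGroups, List.flatten_cons, List.nodup_append, List.mem_append]
    refine ⟨⟨pvNew_nodup _ _, ihn, ?_⟩, ?_⟩
    · intro x hx y hy hEq
      exact ihm y hy (List.mem_append.mpr (Or.inr (hEq ▸ hx)))
    · rintro x (hx | hx)
      · exact pvNew_not_mem_seen _ _ x hx
      · intro hov
        exact ihm x hx (by simp [hov])

-- ---- A's side ----

theorem pvAdd_not_mem (c : PySem.Set String) (n : String) (hn : n ∉ c) :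
    PySem.Set.add c n = c ++ [n] := by
  simp [PySem.Set.add, PySem.Set.contains, hn]

theorem pvA_inner_stream (es : List (String × String))
    (st : PySem.Set String × PySem.Set String) :
    es.foldl (fun st2 edge => [edge.1, edge.2].foldl pvStepA st2) st
      = (pvStream es).foldl pvStepA st := by
  induction es generalizing st with
  | nil => rfl
  | cons e t ih => simp only [pvStream, List.flatMap_cons, List.foldl_append,
      List.foldl_cons, List.foldl_nil] at *; simp [ih]

theorem pvA_inner (l : List String) (ov cur : PySem.Set String)
    (hsub : ∀ x ∈ cur, x ∈ ov) :
    l.foldl pvStepA (ov, cur) = (ov ++ pvNew ov l, cur ++ pvNew ov l) := by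
  induction l generalizing ov cur with
  | nil => simp [pvNew]
  | cons n t ih =>
    by_cases hn : n ∈ ov
    · have hstep : pvStepA (ov, cur) n = (ov, cur) := by
        simp [pvStepA, PySem.Set.contains, hn]
      rw [List.foldl_cons, hstep, pvNew, if_pos (by simpa using hn)]
      exact ih ov cur hsub
    · have hnc : n ∉ cur := fun h => hn (hsub n h)
      have hstep : pvStepA (ov, cur) n = (ov ++ [n], cur ++ [n]) := by
        simp only [pvStepA, PySem.Set.contains]
        rw [if_neg (by simpa using hn), pvAdd_not_mem ov n hn, pvAdd_not_mem cur n hnc]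
      rw [List.foldl_cons, hstep, pvNew, if_neg (by simpa using hn)]
      have hsub' : ∀ x ∈ cur ++ [n], x ∈ ov ++ [n] := by
        intro x hx
        rcases List.mem_append.mp hx with hx | hx
        · exact List.mem_append.mpr (Or.inl (hsub x hx))
        · exact List.mem_append.mpr (Or.inr hx)
      rw [ih (ov ++ [n]) (cur ++ [n]) hsub']
      simp

theorem pvA_outer (rs : List (List (String × String))) (acc : List (List String))
    (ov : PySem.Set String) :
    (rs.foldl pvOuterA (acc, ov)).1 = acc ++ pvGroups ov rs := by
  induction rs generalizing acc ov with
  | nil => simp [pvGroups]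
  | cons r t ih =>
    have hinner : r.foldl (fun st2 edge => [edge.1, edge.2].foldl pvStepA st2)
        (ov, PySem.Set.empty)
        = (ov ++ pvNew ov (pvStream r), PySem.Set.empty ++ pvNew ov (pvStream r)) := by
      rw [pvA_inner_stream]
      exact pvA_inner (pvStream r) ov PySem.Set.empty (by simp [PySem.Set.empty])
    have houter : pvOuterA (acc, ov) r
        = (acc ++ [pvNew ov (pvStream r)], ov ++ pvNew ov (pvStream r)) := by
      simp only [pvOuterA]
      rw [hinner]
      simp [PySem.Set.empty]
    rw [List.foldl_cons, houter, ih]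
    simp [pvGroups]

theorem pvA_groups (rs : List (List (String × String))) :
    get_ranked_nodes rs = pvGroups [] rs := by
  have := pvA_outer rs [] PySem.Set.empty
  simpa [get_ranked_nodes, PySem.Set.empty] using this

-- ---- B's stage 1 ----

theorem pvB_inner_stream (es : List (String × String)) (i : Int)
    (d : PySem.Dict String Int) :
    es.foldl (pvSetdefault2 i) d
      = (pvStream es).foldl (fun d n => d.setdefault n i) d := by
  induction es generalizing d with
  | nil => rfl
  | cons e t ih => simp only [pvStream, pvSetdefault2, List.flatMap_cons,
      List.foldl_append, List.foldl_cons, List.foldl_nil] at *; simp [ih]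

theorem pvB_setdefault_stream (l : List String) (i : Int) (d : PySem.Dict String Int) :
    (l.foldl (fun d n => d.setdefault n i) d).items
      = d.items ++ (pvNew d.keys l).map (fun n => (n, i)) := by
  induction l generalizing d with
  | nil => simp [pvNew]
  | cons n t ih =>
    by_cases hn : n ∈ d.keys
    · have hc : d.contains n = true := (PySem.Dict.contains_iff_mem_keys d n).mpr hn
      rw [List.foldl_cons, PySem.Dict.setdefault_of_contains d i hc, pvNew,
        if_pos (by simpa using hn)]
      exact ih d
    · have hc : d.contains n = false := by
        rw [← Bool.not_eq_true, PySem.Dict.contains_iff_mem_keys]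
        exact hn
      rw [List.foldl_cons, PySem.Dict.setdefault_of_not_contains d i hc, pvNew,
        if_neg (by simpa using hn)]
      rw [ih (d.insert n i), PySem.Dict.items_insert_of_not_contains d i hc]
      have hkeys : (d.insert n i).keys = d.keys ++ [n] := by
        simp only [PySem.Dict.keys, PySem.Dict.items_insert_of_not_contains d i hc]
        simp
      rw [hkeys]
      simp

theorem pvB_dict (rs : List (List (String × String))) (k : Int)
    (d : PySem.Dict String Int) :
    ((PySem.List.enumerate rs k).foldl
        (fun d p => p.2.foldl (pvSetdefault2 p.1) d) d).items
      = d.items ++ pvTag k (pvGroups d.keys rs) := by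
  induction rs generalizing k d with
  | nil => simp [PySem.List.enumerate, pvGroups, pvTag]
  | cons r t ih =>
    rw [PySem.List.enumerate_cons, List.foldl_cons]
    have h1 : (r.foldl (pvSetdefault2 k) d).items
        = d.items ++ (pvNew d.keys (pvStream r)).map (fun n => (n, k)) := by
      rw [pvB_inner_stream]
      exact pvB_setdefault_stream (pvStream r) k d
    have hkeys : (r.foldl (pvSetdefault2 k) d).keys
        = d.keys ++ pvNew d.keys (pvStream r) := by
      simp only [PySem.Dict.keys, h1]
      simp [Function.comp_def]
    rw [ih (k + 1) (r.foldl (pvSetdefault2 k) d), h1, hkeys]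
    simp [pvGroups, pvTag]

-- ---- B's stage 2 ----

theorem pvDistGroup (g : List String) (done : List (List String)) (b : List String)
    (rest : List (List String)) (hnd : g.Nodup) (hfresh : ∀ x ∈ g, x ∉ b) :
    (g.map (fun n => (n, (done.length : Int)))).foldl pvDistStep (done ++ b :: rest)
      = done ++ (b ++ g) :: rest := by
  induction g generalizing b with
  | nil => simp
  | cons n t ih =>
    have hacc : (done ++ b :: rest).getD done.length ([] : List String) = b := by
      simp [List.getD]
    have hset : (done ++ b :: rest).set done.length (b ++ [n]) = done ++ (b ++ [n]) :: rest := by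
      rw [List.set_append]
      simp
    have hstep : pvDistStep (done ++ b :: rest) (n, (done.length : Int))
        = done ++ (b ++ [n]) :: rest := by
      simp only [pvDistStep, PySem.List.pyGetD_natCast, PySem.List.pySetD_natCast, hacc,
        pvAdd_not_mem b n (hfresh n (by simp))]
      exact hset
    rw [List.map_cons, List.foldl_cons, hstep,
      ih (b ++ [n]) (List.Nodup.of_cons hnd) ?_]
    · simp
    · intro x hx
      simp only [List.mem_append, List.mem_singleton]
      rintro (hb | rfl)
      · exact hfresh x (by simp [hx]) hb
      · exact (List.nodup_cons.mp hnd).1 hx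

theorem pvDistAll (gs : List (List String)) (done : List (List String))
    (hnd : gs.flatten.Nodup) :
    (pvTag (done.length : Int) gs).foldl pvDistStep
        (done ++ List.replicate gs.length []) = done ++ gs := by
  induction gs generalizing done with
  | nil => simp [pvTag]
  | cons g t ih =>
    rw [pvTag, List.foldl_append, List.length_cons, List.replicate_succ,
      pvDistGroup g done [] (List.replicate t.length [])
        (List.nodup_append.mp (by simpa using hnd)).1 (by simp)]
    have h1 : done ++ ([] ++ g) :: List.replicate t.length ([] : List String)
        = (done ++ [g]) ++ List.replicate t.length [] := by simp
    have h2 : ((done.length : Int) + 1) = (((done ++ [g]).length : Nat) : Int) := by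
      simp
    rw [h1, h2, ih (done ++ [g]) (List.nodup_append.mp (by simpa using hnd)).2.1]
    simp

-- ===== VERDICT (by name: the statement is the Claim_ definition above) =====
theorem get_ranked_nodes_spec : Claim_equal_get_ranked_nodes := by
  intro rs _
  show get_ranked_nodes rs = get_ranked_nodes_alt rs
  have hitems : (pvFirstDict rs).items = pvTag 0 (pvGroups [] rs) := by
    have := pvB_dict rs 0 PySem.Dict.empty
    simpa [pvFirstDict, PySem.Dict.empty] using this
  have hinit : rs.map (fun _ => (PySem.Set.empty : PySem.Set String))
      = List.replicate (pvGroups [] rs).length ([] : List String) := by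
    rw [pvGroups_length]
    simp [PySem.Set.empty, List.map_const']
  have hdist := pvDistAll (pvGroups [] rs) []
    (pvGroups_flatten_nodup rs []).1
  simp only [List.nil_append, List.length_nil, Nat.cast_zero] at hdist
  rw [pvA_groups, get_ranked_nodes_alt]
  rw [hitems, hinit, hdist]
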